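-- pv_equiv track=rewrite | github.com/clemaitre58/test_data_hit | test_integrite.py | hit_detector
-- ===== SOURCE A (Python) =====
-- def hit_detector(l_strength_data, thr_detector, delta_t) :
--     l_res = []
--     last_detect = 0
--     for i in range(len(l_strength_data)) :
--         if i > 1 :
--             # TODO mettre le critère sur la fenêtre de temps
--             if (l_strength_data[i] < l_strength_data[i-1]) and (l_strength_data[i] > thr_detector) and (i - last_detect > delta_t) :
--                 l_res.append(1000)
--                 last_detect = i
--             else :
--                 l_res.append(0)
--         else :
--             l_res.append(0)
--
--     return l_res
-- ===== SOURCE B (Python) =====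
-- def hit_detector(l_strength_data, thr_detector, delta_t):
--     n = len(l_strength_data)
--     # pass 1: local peak candidates (ignore refractory state)
--     candidates = [i for i in range(2, n)
--                   if l_strength_data[i] < l_strength_data[i - 1]
--                   and l_strength_data[i] > thr_detector]
--     # pass 2: greedy refractory selection over candidates
--     accepted = []
--     last_detect = 0
--     for i in candidates:
--         if i - last_detect > delta_t:
--             accepted.append(i)
--             last_detect = i
--     # pass 3: render the output
--     return [1000 if i in accepted else 0 for i in range(n)]
-- ===== Notes on version B (the rewrite author's own statement) =====
-- stated objective: alternative
-- what changed: replaces A's single stateful scan (per-index branch with running last_detect) by three passes: collect candidate local-peak indices, greedily apply the refractory gap to pick accepted indices, then render the 0/1000 output by membership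
import Mathlib
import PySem

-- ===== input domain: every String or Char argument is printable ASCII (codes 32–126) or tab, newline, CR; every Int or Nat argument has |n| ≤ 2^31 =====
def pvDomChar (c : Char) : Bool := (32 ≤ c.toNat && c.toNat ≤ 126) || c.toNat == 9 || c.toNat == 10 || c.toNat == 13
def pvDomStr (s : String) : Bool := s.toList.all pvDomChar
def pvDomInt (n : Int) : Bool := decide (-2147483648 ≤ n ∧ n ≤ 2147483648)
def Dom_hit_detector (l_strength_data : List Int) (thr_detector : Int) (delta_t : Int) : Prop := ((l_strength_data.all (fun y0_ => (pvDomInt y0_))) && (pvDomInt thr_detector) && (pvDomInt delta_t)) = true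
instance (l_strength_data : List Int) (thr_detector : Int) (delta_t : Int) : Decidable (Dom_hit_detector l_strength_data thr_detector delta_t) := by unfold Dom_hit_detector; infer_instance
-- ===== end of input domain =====

-- B replaces A's single stateful scan by three passes (candidate peaks, greedy refractory selection, rendering); alternative decomposition, not faster.

-- ===== PORT A =====
-- loop body of A's scan; state = (l_res, last_detect)
def hd_step (l_strength_data : List Int) (thr_detector : Int) (delta_t : Int)
    (st : List Int × Int) (i : Int) : List Int × Int :=
  if i > 1 then
    if PySem.List.pyGetD l_strength_data i 0 < PySem.List.pyGetD l_strength_data (i - 1) 0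
        ∧ PySem.List.pyGetD l_strength_data i 0 > thr_detector
        ∧ i - st.2 > delta_t then
      (st.1 ++ [1000], i)
    else
      (st.1 ++ [0], st.2)
  else
    (st.1 ++ [0], st.2)

def hit_detector (l_strength_data : List Int) (thr_detector : Int) (delta_t : Int) : List Int :=
  ((PySem.List.pyRange 0 (PySem.List.len l_strength_data) 1).foldl
    (hd_step l_strength_data thr_detector delta_t) ([], 0)).1

-- ===== PORT B =====
-- pass-1 test: is i a candidate local peak (refractory state ignored)
def hd_cond (l_strength_data : List Int) (thr_detector : Int) (i : Int) : Bool :=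
  decide (PySem.List.pyGetD l_strength_data i 0 < PySem.List.pyGetD l_strength_data (i - 1) 0
    ∧ PySem.List.pyGetD l_strength_data i 0 > thr_detector)

-- pass-2 step: greedy refractory selection; state = (accepted, last_detect)
def hd_sel (delta_t : Int) (st : List Int × Int) (i : Int) : List Int × Int :=
  if i - st.2 > delta_t then (st.1 ++ [i], i) else st

def hit_detector_alt (l_strength_data : List Int) (thr_detector : Int) (delta_t : Int) : List Int :=
  let n := PySem.List.len l_strength_data
  let candidates := (PySem.List.pyRange 2 n 1).filter (hd_cond l_strength_data thr_detector)
  let accepted := (candidates.foldl (hd_sel delta_t) ([], 0)).1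
  (PySem.List.pyRange 0 n 1).map (fun i => if i ∈ accepted then (1000 : Int) else 0)

-- ===== PRECONDITION & SPEC =====
def Spec_hit_detector (l_strength_data : List Int) (thr_detector : Int) (delta_t : Int) (out : List Int) : Prop := out = hit_detector_alt l_strength_data thr_detector delta_t
instance (l_strength_data : List Int) (thr_detector : Int) (delta_t : Int) (out : List Int) : Decidable (Spec_hit_detector l_strength_data thr_detector delta_t out) := by unfold Spec_hit_detector; infer_instance

-- ===== CLAIM (what is proved, stated in full; the proofs are below) =====
def Claim_equal_hit_detector : Prop := ∀ (l_strength_data : List Int) (thr_detector : Int) (delta_t : Int), Dom_hit_detector l_strength_data thr_detector delta_t → Spec_hit_detector l_strength_data thr_detector delta_t (hit_detector l_strength_data thr_detector delta_t)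

-- ===== LEMMAS AND PROOFS =====

-- B's selection state after scanning candidate indices below the bound b
def hd_bstate (l_strength_data : List Int) (thr_detector : Int) (delta_t : Int) (b : Int) : List Int × Int :=
  ((PySem.List.pyRange 2 b 1).filter (hd_cond l_strength_data thr_detector)).foldl
    (hd_sel delta_t) ([], 0)

-- one step of A's loop, expressed through B's selection step
lemma hd_step_eq (xs : List Int) (thr dt : Int) (r : List Int) (S : List Int × Int) (m : Int)
    (hm2 : 2 ≤ m) (hinv : ∀ j ∈ S.1, 2 ≤ j ∧ j < m) (hr : ∀ j ∈ r, j < m) :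
    hd_step xs thr dt (r.map (fun i => if i ∈ S.1 then (1000 : Int) else 0), S.2) m
      = ((r ++ [m]).map (fun i =>
            if i ∈ (if hd_cond xs thr m then hd_sel dt S m else S).1 then (1000 : Int) else 0),
         (if hd_cond xs thr m then hd_sel dt S m else S).2) := by
  have hSm : m ∉ S.1 := fun h => absurd (hinv m h).2 (lt_irrefl m)
  unfold hd_step hd_cond hd_sel
  rw [if_pos (show m > 1 by omega)]
  by_cases h12 : PySem.List.pyGetD xs m 0 < PySem.List.pyGetD xs (m - 1) 0
      ∧ PySem.List.pyGetD xs m 0 > thr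
  · by_cases hgap : m - S.2 > dt
    · rw [if_pos ⟨h12.1, h12.2, hgap⟩, if_pos (decide_eq_true h12), if_pos hgap]
      simp only [List.map_append, List.map_singleton, Prod.mk.injEq]
      refine ⟨?_, trivial⟩
      rw [if_pos (by simp : m ∈ S.1 ++ [m])]
      congr 1
      apply List.map_congr_left
      intro j hj
      have hjm : j ≠ m := by have := hr j hj; omega
      simp [List.mem_append, hjm]
    · rw [if_neg (fun hconj => hgap hconj.2.2), if_pos (decide_eq_true h12), if_neg hgap]
      simp only [List.map_append, List.map_singleton, Prod.mk.injEq]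
      exact ⟨by rw [if_neg hSm], trivial⟩
  · rw [if_neg (fun hconj => h12 ⟨hconj.1, hconj.2.1⟩),
        if_neg (fun hd => h12 (of_decide_eq_true hd))]
    simp only [List.map_append, List.map_singleton, Prod.mk.injEq]
    exact ⟨by rw [if_neg hSm], trivial⟩

-- main invariant: A's scan over [0, m) equals B's rendering from its selection state
lemma hd_main (xs : List Int) (thr dt : Int) (m : Nat) :
    (∀ j ∈ (hd_bstate xs thr dt (m : Int)).1, 2 ≤ j ∧ j < (m : Int)) ∧
    (PySem.List.pyRange 0 (m : Int) 1).foldl (hd_step xs thr dt) ([], 0)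
      = ((PySem.List.pyRange 0 (m : Int) 1).map
           (fun i => if i ∈ (hd_bstate xs thr dt (m : Int)).1 then (1000 : Int) else 0),
         (hd_bstate xs thr dt (m : Int)).2) := by
  induction m with
  | zero =>
    constructor
    · intro j hj
      unfold hd_bstate at hj
      rw [show ((0 : Nat) : Int) = 0 from rfl,
          PySem.List.pyRange_one_eq_nil (by norm_num : (0 : Int) ≤ 2)] at hj
      simp at hj
    · unfold hd_bstate
      rw [show ((0 : Nat) : Int) = 0 from rfl,
          PySem.List.pyRange_one_eq_nil (le_refl (0 : Int)),
          PySem.List.pyRange_one_eq_nil (by norm_num : (0 : Int) ≤ 2)]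
      simp
  | succ m ih =>
    obtain ⟨inv, heq⟩ := ih
    have hm0 : (0 : Int) ≤ (m : Int) := by positivity
    push_cast
    have hr := PySem.List.pyRange_one_succ_right hm0
    by_cases hm2 : (2 : Int) ≤ (m : Int)
    · have hc := PySem.List.pyRange_one_succ_right hm2
      have hstep : hd_bstate xs thr dt ((m : Int) + 1)
          = (if hd_cond xs thr (m : Int) then hd_sel dt (hd_bstate xs thr dt (m : Int)) (m : Int)
             else hd_bstate xs thr dt (m : Int)) := by
        unfold hd_bstate
        rw [hc, List.filter_append, List.foldl_append]
        by_cases h : hd_cond xs thr (m : Int) = true <;> simp [h]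
      constructor
      · intro j hj
        rw [hstep] at hj
        split_ifs at hj with h
        · unfold hd_sel at hj
          split_ifs at hj with hgap
          · simp only [List.mem_append, List.mem_singleton] at hj
            rcases hj with hj | rfl
            · exact ⟨(inv j hj).1, by have := (inv j hj).2; omega⟩
            · exact ⟨hm2, by omega⟩
          · exact ⟨(inv j hj).1, by have := (inv j hj).2; omega⟩
        · exact ⟨(inv j hj).1, by have := (inv j hj).2; omega⟩
      · rw [hr, List.foldl_append, heq]
        simp only [List.foldl_cons, List.foldl_nil]
        rw [hstep]
        exact hd_step_eq xs thr dt (PySem.List.pyRange 0 (m : Int) 1)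
          (hd_bstate xs thr dt (m : Int)) (m : Int) hm2 inv
          (fun j hj => ((PySem.List.mem_pyRange_one).1 hj).2)
    · have hb1 : hd_bstate xs thr dt ((m : Int) + 1) = ([], 0) := by
        unfold hd_bstate
        rw [PySem.List.pyRange_one_eq_nil (by omega)]
        rfl
      have hb0 : hd_bstate xs thr dt (m : Int) = ([], 0) := by
        unfold hd_bstate
        rw [PySem.List.pyRange_one_eq_nil (by omega)]
        rfl
      rw [hb0] at heq
      constructor
      · intro j hj
        rw [hb1] at hj
        simp at hj
      · rw [hr, List.foldl_append, heq, hb1]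
        simp only [List.foldl_cons, List.foldl_nil, List.map_append, List.map_singleton]
        unfold hd_step
        rw [if_neg (by omega : ¬ ((m : Int) > 1))]
        simp

-- ===== VERDICT (by name: the statement is the Claim_ definition above) =====
theorem hit_detector_spec : Claim_equal_hit_detector := by
  intro xs thr dt _
  unfold Spec_hit_detector
  have h := (hd_main xs thr dt xs.length).2
  unfold hd_bstate at h
  simp only [hit_detector, hit_detector_alt, PySem.List.len_eq]
  rw [h]
  rfl
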